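-- pv_equiv track=rewrite | github.com/didar2007/pp2labs | lab3/f8.py | spy_game
-- ===== SOURCE A (Python) =====
-- def spy_game(nums):
--     code = [0, 0, 7]
--     for n in nums:
--         if n == code[0]:
--             code.pop(0)
--         if not code:
--             return True
--     return False
-- ===== SOURCE B (Python) =====
-- def spy_game(nums):
--     it = iter(nums)
--     return all(any(x == c for x in it) for c in (0, 0, 7))
-- ===== Notes on version B (the rewrite author's own statement) =====
-- stated objective: idiomatic
-- what changed: Replaced the explicit loop mutating a code list with a single shared iterator consumed across the targets via all(any(...)): each any() advances the one iterator to the next needed value.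
import Mathlib
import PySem

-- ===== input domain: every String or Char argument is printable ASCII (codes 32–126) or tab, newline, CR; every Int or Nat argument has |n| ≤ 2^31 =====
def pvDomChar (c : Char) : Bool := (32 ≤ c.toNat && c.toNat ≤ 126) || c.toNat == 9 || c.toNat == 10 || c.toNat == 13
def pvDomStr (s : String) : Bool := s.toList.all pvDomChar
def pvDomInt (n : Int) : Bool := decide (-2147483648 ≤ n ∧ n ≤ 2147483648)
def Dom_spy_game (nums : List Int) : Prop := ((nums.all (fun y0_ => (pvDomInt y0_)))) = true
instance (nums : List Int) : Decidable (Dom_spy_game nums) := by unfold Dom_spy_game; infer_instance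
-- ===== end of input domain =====

-- B rewrites A's mutating loop as a shared iterator consumed across the targets (idiomatic all/any decomposition); same values everywhere.

-- ===== PORT A =====
-- A's loop: `code` starts as [0,0,7]; each n pops the head if it matches, returning True when code empties.
def spy_game_loop (code : List Int) (nums : List Int) : Bool :=
  match nums with
  | [] => false
  | n :: ns =>
    match code with
    | [] => false  -- unreachable: code is never empty on entry (A would raise on code[0])
    | c :: cs =>
      let code' := if n = c then cs else c :: cs
      if code'.isEmpty then true else spy_game_loop code' ns

def spy_game (nums : List Int) : Bool := spy_game_loop [0, 0, 7] nums

-- ===== PORT B =====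
-- `any(x == c for x in it)`: advance the shared iterator past the first occurrence of c, none if exhausted
def pvConsume (c : Int) : List Int → Option (List Int)
  | [] => none
  | x :: xs => if x = c then some xs else pvConsume c xs

-- `all(any(x == c for x in it) for c in (0,0,7))` over the shared iterator
def pvAllConsume (cs : List Int) (it : List Int) : Bool :=
  match cs with
  | [] => true
  | c :: cs' =>
    match pvConsume c it with
    | none => false
    | some it' => pvAllConsume cs' it'

def spy_game_alt (nums : List Int) : Bool := pvAllConsume [0, 0, 7] nums

-- ===== PRECONDITION & SPEC =====
def Spec_spy_game (nums : List Int) (out : Bool) : Prop := out = spy_game_alt nums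
instance (nums : List Int) (out : Bool) : Decidable (Spec_spy_game nums out) := by unfold Spec_spy_game; infer_instance

-- ===== CLAIM (what is proved, stated in full; the proofs are below) =====
def Claim_equal_spy_game : Prop := ∀ (nums : List Int), Dom_spy_game nums → Spec_spy_game nums (spy_game nums)

-- ===== LEMMAS AND PROOFS =====
lemma loop_eq_allConsume (nums : List Int) : ∀ c cs,
    spy_game_loop (c :: cs) nums = pvAllConsume (c :: cs) nums := by
  induction nums with
  | nil => intro c cs; simp [spy_game_loop, pvAllConsume, pvConsume]
  | cons n ns ih =>
    intro c cs
    by_cases h : n = c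
    · cases cs with
      | nil => simp [spy_game_loop, pvAllConsume, pvConsume, h]
      | cons c' cs' =>
        simp [spy_game_loop, pvAllConsume, pvConsume, h, List.isEmpty]
        exact ih c' cs'
    · simp only [spy_game_loop, pvAllConsume, pvConsume, if_neg h, List.isEmpty]
      exact ih c cs

-- ===== VERDICT (by name: the statement is the Claim_ definition above) =====
theorem spy_game_spec : Claim_equal_spy_game := by
  intro nums _
  unfold Spec_spy_game spy_game spy_game_alt
  exact loop_eq_allConsume nums 0 [0, 7]
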